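-- pv_equiv track=rewrite | github.com/uucyce/vetka-mcp-full | scripts/voice_speculative_benchmark.py | _parse_interrupt_prompt
-- ===== SOURCE A (Python) =====
-- def _parse_interrupt_prompt(prompt: str) -> tuple[str, str]:
--     raw = (prompt or "").strip()
--     if not raw.startswith("INTERRUPT_TEST::"):
--         return "", ""
--     body = raw.split("::", 1)[1]
--     first, second = "", ""
--     for part in body.split(";"):
--         if part.startswith("first="):
--             first = part[len("first=") :].strip()
--         elif part.startswith("second="):
--             second = part[len("second=") :].strip()
--     return first, second
-- ===== SOURCE B (Python) =====
-- def _parse_interrupt_prompt(prompt: str) -> tuple[str, str]: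
--     raw = (prompt or "").strip()
--     if not raw.startswith("INTERRUPT_TEST::"):
--         return "", ""
--     d = {}
--     for part in raw[len("INTERRUPT_TEST::"):].split(";"):
--         i = part.find("=")
--         if i >= 0:
--             d[part[:i]] = part[i + 1:]
--     return d.get("first", "").strip(), d.get("second", "").strip()
-- ===== Notes on version B (the rewrite author's own statement) =====
-- stated objective: idiomatic
-- what changed: B parses every key=value part into a dict (split at the first '=' via find; later duplicates overwrite) and then looks up 'first'/'second', and takes the body by a fixed-length slice, instead of A's branchy per-prefix accumulator scan and split('::',1).
import Mathlib
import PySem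

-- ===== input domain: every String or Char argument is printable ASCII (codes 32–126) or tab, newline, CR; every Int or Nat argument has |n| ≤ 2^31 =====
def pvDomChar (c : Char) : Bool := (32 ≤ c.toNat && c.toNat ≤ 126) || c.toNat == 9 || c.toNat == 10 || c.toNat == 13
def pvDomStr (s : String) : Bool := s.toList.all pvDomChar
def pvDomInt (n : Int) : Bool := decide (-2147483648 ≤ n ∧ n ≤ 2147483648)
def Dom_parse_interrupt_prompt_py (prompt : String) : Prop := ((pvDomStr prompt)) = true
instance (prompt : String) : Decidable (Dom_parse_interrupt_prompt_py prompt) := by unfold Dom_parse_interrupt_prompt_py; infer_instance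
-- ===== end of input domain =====

-- B parses every key=value part into a dict (split at the first '=') and then looks up
-- 'first'/'second', taking the body by a fixed-length slice — a table-then-lookup structure
-- instead of A's branchy per-prefix accumulator scan (objective: idiomatic; same cost).

-- ===== PORT A =====
-- the loop body of A's `for part in body.split(";")`
def pyA_step (fs : String × String) (part : String) : String × String :=
  if PySem.Str.startswith part "first=" then
    (PySem.Str.strip (PySem.Str.slice part (some 6) none), fs.2)
  else if PySem.Str.startswith part "second=" then
    (fs.1, PySem.Str.strip (PySem.Str.slice part (some 7) none))
  else fs

def parse_interrupt_prompt_py (prompt : String) : String × String :=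
  let raw := PySem.Str.strip (if prompt = "" then "" else prompt)  -- (prompt or "").strip()
  if PySem.Str.startswith raw "INTERRUPT_TEST::" = false then ("", "")
  else
    -- raw.split("::", 1)[1]; the split is `some` (sep ≠ "") and index 1 is in range under the
    -- startswith guard, so both getD are exact
    let body := ((PySem.Str.splitMax? raw "::" 1).getD []).getD 1 ""
    ((PySem.Str.split? body ";").getD []).foldl pyA_step ("", "")  -- split? is `some`: ";" ≠ ""

-- ===== PORT B =====
-- the loop body of B's dict-building pass: i = part.find("="); if i >= 0: d[part[:i]] = part[i+1:]
def pyB_step (d : PySem.Dict String String) (part : String) : PySem.Dict String String :=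
  let i := PySem.Str.find part "="
  if 0 ≤ i then
    d.insert (PySem.Str.slice part none (some i)) (PySem.Str.slice part (some (i + 1)) none)
  else d

def parse_interrupt_prompt_py_alt (prompt : String) : String × String :=
  let raw := PySem.Str.strip (if prompt = "" then "" else prompt)
  if PySem.Str.startswith raw "INTERRUPT_TEST::" = false then ("", "")
  else
    let body := PySem.Str.slice raw (some 16) none  -- raw[len("INTERRUPT_TEST::"):]
    let d := ((PySem.Str.split? body ";").getD []).foldl pyB_step PySem.Dict.empty
    (PySem.Str.strip (d.getD "first" ""), PySem.Str.strip (d.getD "second" ""))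

-- ===== PRECONDITION & SPEC =====
def Spec_parse_interrupt_prompt_py (prompt : String) (out : String × String) : Prop := out = parse_interrupt_prompt_py_alt prompt
instance (prompt : String) (out : String × String) : Decidable (Spec_parse_interrupt_prompt_py prompt out) := by unfold Spec_parse_interrupt_prompt_py; infer_instance

-- ===== CLAIM (what is proved, stated in full; the proofs are below) =====
def Claim_equal_parse_interrupt_prompt_py : Prop := ∀ (prompt : String), Dom_parse_interrupt_prompt_py prompt → Spec_parse_interrupt_prompt_py prompt (parse_interrupt_prompt_py prompt)

-- ===== LEMMAS AND PROOFS =====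

-- a singleton list is a prefix iff it is the head
theorem pv_single_prefix {a : Char} {l : List Char} : [a] <+: l ↔ l.head? = some a := by
  cases l with
  | nil => simp
  | cons b t => simp [List.cons_prefix_cons, eq_comm]

theorem pv_eqStr {s t : String} (h : s.toList = t.toList) : s = t := by
  have := congrArg String.ofList h
  rwa [String.ofList_toList, String.ofList_toList] at this

-- splitOnMax.go with the split budget exhausted returns the rest as one piece
theorem pv_go_zero (sep : List Char) : ∀ (fuel : Nat) (l cur : List Char) (acc : List (List Char)),
    PySem.Chars.splitOnMax.go sep fuel 0 l cur acc = ((cur.reverse ++ l) :: acc).reverse := by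
  intro fuel l cur acc
  cases fuel with
  | zero => rfl
  | succ f =>
    cases l with
    | nil => simp [PySem.Chars.splitOnMax.go]
    | cons c t => simp [PySem.Chars.splitOnMax.go]

-- splitOnMax.go with budget 1 splits at the first occurrence of sep
theorem pv_go_found (sep : List Char) (hsep : sep ≠ []) :
    ∀ (fuel : Nat) (pre post cur : List Char) (acc : List (List Char)),
    pre.length < fuel →
    (∀ j < pre.length, ¬ sep <+: (pre ++ sep ++ post).drop j) →
    PySem.Chars.splitOnMax.go sep fuel 1 (pre ++ sep ++ post) cur acc
      = acc.reverse ++ [cur.reverse ++ pre, post] := by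
  intro fuel
  induction fuel with
  | zero => intro pre post cur acc h _; omega
  | succ f ih =>
    intro pre post cur acc hlen hmin
    cases pre with
    | nil =>
      cases sep with
      | nil => exact absurd rfl hsep
      | cons s0 st =>
        have hpref : (s0 :: st).isPrefixOf ((s0 :: st) ++ post) = true :=
          List.isPrefixOf_iff_prefix.mpr (List.prefix_append _ _)
        simp only [List.nil_append, List.cons_append]
        simp only [List.cons_append] at hpref
        rw [PySem.Chars.splitOnMax.go]
        simp only [hpref, if_neg (by omega : ¬ (1 : Nat) = 0), if_true]
        have hdrop : List.drop (s0 :: st).length (s0 :: (st ++ post)) = post := by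
          have h := List.drop_left (l₁ := s0 :: st) (l₂ := post)
          simp only [List.cons_append] at h
          exact h
        rw [hdrop, pv_go_zero]
        simp
    | cons c pt =>
      have h0 : ¬ sep <+: ((c :: pt) ++ sep ++ post) := by
        have := hmin 0 (by simp)
        simpa using this
      have hnp : sep.isPrefixOf (c :: (pt ++ sep ++ post)) = false := by
        cases h : sep.isPrefixOf (c :: (pt ++ sep ++ post)) with
        | false => rfl
        | true =>
          refine absurd (List.isPrefixOf_iff_prefix.mp h) ?_
          simpa using h0
      simp only [List.cons_append]
      rw [PySem.Chars.splitOnMax.go]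
      simp only [hnp, if_neg (by omega : ¬ (1 : Nat) = 0), Bool.false_eq_true, if_false]
      have hrec := ih pt post (c :: cur) acc (by simpa using Nat.lt_of_succ_lt_succ hlen)
        (fun j hj => by
          have := hmin (j + 1) (by simpa using Nat.succ_lt_succ hj)
          simpa using this)
      simp only [List.append_assoc] at hrec ⊢
      rw [hrec]
      simp

theorem pv_splitOnMax_one (sep pre post : List Char) (hsep : sep ≠ [])
    (hmin : ∀ j < pre.length, ¬ sep <+: (pre ++ sep ++ post).drop j) :
    PySem.Chars.splitOnMax (pre ++ sep ++ post) sep 1 = [pre, post] := by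
  unfold PySem.Chars.splitOnMax
  rw [if_neg (by omega : ¬ (1 : Int) < 0)]
  have h1 : (1 : Int).toNat = 1 := rfl
  rw [h1, pv_go_found sep hsep _ pre post [] [] (by simp) hmin]
  simp

-- a part that contains no '=' starts with neither "first=" nor "second="
theorem pv_startswith_false {p : String} {t : String} (hnin : '=' ∉ p.toList)
    (hmem : '=' ∈ t.toList) : PySem.Str.startswith p t = false := by
  rw [PySem.Str.startswith_eq]
  cases h : PySem.Chars.startswith p.toList t.toList with
  | false => rfl
  | true =>
    exact absurd (List.IsPrefix.mem hmem ((PySem.Chars.startswith_iff _ _).mp h)) hnin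

-- the per-part step equivalence: A's accumulator step matches B's dict step under the lookups
theorem pv_step (d : PySem.Dict String String) (p : String) :
    pyA_step (PySem.Str.strip (d.getD "first" ""), PySem.Str.strip (d.getD "second" "")) p
      = (PySem.Str.strip ((pyB_step d p).getD "first" ""),
         PySem.Str.strip ((pyB_step d p).getD "second" "")) := by
  by_cases hi : 0 ≤ PySem.Str.find p "="
  case neg =>
    -- no '=' in p: A's prefix tests fail, B skips the part
    have hb : PySem.Chars.find p.toList ['='] = PySem.Str.find p "=" := by
      rw [PySem.Str.find_eq]; rfl
    have hfind : PySem.Str.find p "=" = -1 := by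
      have := PySem.Chars.neg_one_le_find p.toList ['=']
      omega
    have hnin : '=' ∉ p.toList := by
      intro hmem
      obtain ⟨s, t, hst⟩ := List.append_of_mem hmem
      have hinf : ['='] <:+: p.toList := ⟨s, t, by rw [hst]; simp⟩
      exact ((PySem.Chars.find_eq_neg_one_iff _ _).mp (by rw [hb, hfind])) hinf
    have hf : PySem.Str.startswith p "first=" = false := pv_startswith_false hnin (by decide)
    have hs : PySem.Str.startswith p "second=" = false := pv_startswith_false hnin (by decide)
    simp only [pyA_step, pyB_step, hf, hs, hfind, Bool.false_eq_true, if_false]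
    norm_num
  case pos =>
    have hb : PySem.Chars.find p.toList ['='] = PySem.Str.find p "=" := by
      rw [PySem.Str.find_eq]; rfl
    set n : Nat := (PySem.Str.find p "=").toNat with hn
    have hfc : PySem.Chars.find p.toList ['='] = (n : Int) := by omega
    obtain ⟨hpre, hmin⟩ := PySem.Chars.find_spec (s := p.toList) (sub := ['=']) (by omega)
    rw [hfc] at hpre hmin
    simp only [Int.toNat_natCast] at hpre hmin
    have hgn : p.toList[n]? = some '=' := by
      rw [← List.head?_drop]; exact pv_single_prefix.mp hpre
    have hlt : n < p.toList.length := (List.getElem?_eq_some_iff.mp hgn).1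
    have hdecomp : p.toList.drop n = '=' :: p.toList.drop (n + 1) := by
      cases hD : p.toList.drop n with
      | nil => rw [← List.head?_drop, hD] at hgn; simp at hgn
      | cons c rest =>
        rw [← List.head?_drop, hD] at hgn
        simp at hgn
        have hrest : rest = p.toList.drop (n + 1) := by
          have ht := List.tail_drop (l := p.toList) (i := n)
          rw [hD] at ht
          simpa using ht
        rw [hgn, hrest]
    have htk : ∀ j < n, p.toList[j]? ≠ some '=' := by
      intro j hj h
      exact hmin j hj (pv_single_prefix.mpr (by rw [List.head?_drop]; exact h))
    have hkl : (PySem.Str.slice p none (some (PySem.Str.find p "="))).toList = p.toList.take n := by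
      rw [PySem.Str.toList_slice, PySem.Chars.slice_eq_listSlice, PySem.List.slice_to _ hi, hn]
    have hvl : (PySem.Str.slice p (some (PySem.Str.find p "=" + 1)) none).toList
        = p.toList.drop (n + 1) := by
      rw [PySem.Str.toList_slice, PySem.Chars.slice_eq_listSlice,
        PySem.List.slice_from _ (by omega)]
      congr 1
      omega
    by_cases hf : PySem.Str.startswith p "first=" = true
    case pos =>
      have hp6 : "first=".toList <+: p.toList :=
        (PySem.Chars.startswith_iff _ _).mp (by rw [← PySem.Str.startswith_eq]; exact hf)
      obtain ⟨r, hr⟩ := hp6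
      have hn5 : n = 5 := by
        have h5 : p.toList[5]? = some '=' := by
          rw [← hr, List.getElem?_append_left (by decide)]; decide
        rcases Nat.lt_trichotomy n 5 with h | h | h
        · have h' := hgn
          rw [← hr, List.getElem?_append_left
            (show n < ("first=".toList).length by
              rw [show ("first=".toList).length = 6 from by decide]; omega)] at h'
          interval_cases n <;> exact absurd h' (by decide)
        · exact h
        · exact absurd h5 (htk 5 h)
      have hfind5 : PySem.Str.find p "=" = 5 := by omega
      have hkey : PySem.Str.slice p none (some (PySem.Str.find p "=")) = "first" := by
        apply pv_eqStr
        rw [hkl, hn5, ← hr, List.take_append_of_le_length (by decide)]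
        decide
      have hval : PySem.Str.slice p (some (PySem.Str.find p "=" + 1)) none
          = PySem.Str.slice p (some 6) none := by
        apply pv_eqStr
        rw [hvl, hn5, PySem.Str.toList_slice, PySem.Chars.slice_eq_listSlice,
          PySem.List.slice_from _ (by omega)]
        congr 1
      simp only [pyA_step, pyB_step, hf, if_true, if_pos hi, hkey, hval]
      rw [PySem.Dict.getD_insert, PySem.Dict.getD_insert,
        if_pos rfl, if_neg (by decide : ¬ ("second" : String) = "first")]
    case neg =>
      by_cases hs : PySem.Str.startswith p "second=" = true
      case pos =>
        have hp7 : "second=".toList <+: p.toList :=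
          (PySem.Chars.startswith_iff _ _).mp (by rw [← PySem.Str.startswith_eq]; exact hs)
        obtain ⟨r, hr⟩ := hp7
        have hn6 : n = 6 := by
          have h6 : p.toList[6]? = some '=' := by
            rw [← hr, List.getElem?_append_left (by decide)]; decide
          rcases Nat.lt_trichotomy n 6 with h | h | h
          · have h' := hgn
            rw [← hr, List.getElem?_append_left
              (show n < ("second=".toList).length by
                rw [show ("second=".toList).length = 7 from by decide]; omega)] at h'
            interval_cases n <;> exact absurd h' (by decide)
          · exact h
          · exact absurd h6 (htk 6 h)
        have hkey : PySem.Str.slice p none (some (PySem.Str.find p "=")) = "second" := by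
          apply pv_eqStr
          rw [hkl, hn6, ← hr, List.take_append_of_le_length (by decide)]
          decide
        have hval : PySem.Str.slice p (some (PySem.Str.find p "=" + 1)) none
            = PySem.Str.slice p (some 7) none := by
          apply pv_eqStr
          rw [hvl, hn6, PySem.Str.toList_slice, PySem.Chars.slice_eq_listSlice,
            PySem.List.slice_from _ (by omega)]
          congr 1
        simp only [pyA_step, pyB_step, hf, hs, if_true, Bool.false_eq_true, if_false,
          if_pos hi, hkey, hval]
        rw [PySem.Dict.getD_insert, PySem.Dict.getD_insert,
          if_pos rfl, if_neg (by decide : ¬ ("first" : String) = "second")]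
      case neg =>
        -- an unrelated key: B's insert does not touch either lookup
        have hsplit : p.toList = p.toList.take n ++ '=' :: p.toList.drop (n + 1) := by
          conv_lhs => rw [← List.take_append_drop n p.toList]
          rw [hdecomp]
        have hkf : PySem.Str.slice p none (some (PySem.Str.find p "=")) ≠ "first" := by
          intro hk
          have hkl' : p.toList.take n = "first".toList := by rw [← hkl, hk]
          apply hf
          rw [PySem.Str.startswith_eq]
          apply (PySem.Chars.startswith_iff _ _).mpr
          refine ⟨p.toList.drop (n + 1), ?_⟩
          rw [show ("first=".toList : List Char) = "first".toList ++ ['='] from by decide]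
          conv_rhs => rw [hsplit, hkl']
          simp
        have hks : PySem.Str.slice p none (some (PySem.Str.find p "=")) ≠ "second" := by
          intro hk
          have hkl' : p.toList.take n = "second".toList := by rw [← hkl, hk]
          apply hs
          rw [PySem.Str.startswith_eq]
          apply (PySem.Chars.startswith_iff _ _).mpr
          refine ⟨p.toList.drop (n + 1), ?_⟩
          rw [show ("second=".toList : List Char) = "second".toList ++ ['='] from by decide]
          conv_rhs => rw [hsplit, hkl']
          simp
        have hf' : PySem.Str.startswith p "first=" = false := by
          cases h : PySem.Str.startswith p "first=" with
          | false => rfl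
          | true => exact absurd h hf
        have hs' : PySem.Str.startswith p "second=" = false := by
          cases h : PySem.Str.startswith p "second=" with
          | false => rfl
          | true => exact absurd h hs
        simp only [pyA_step, pyB_step, hf', hs', Bool.false_eq_true, if_false, if_pos hi]
        rw [PySem.Dict.getD_insert, PySem.Dict.getD_insert,
          if_neg (fun h => hkf h.symm), if_neg (fun h => hks h.symm)]

-- the fold invariant: A's accumulator pair is B's dict seen through the two lookups
theorem pv_fold (ps : List String) : ∀ (d : PySem.Dict String String),
    ps.foldl pyA_step (PySem.Str.strip (d.getD "first" ""), PySem.Str.strip (d.getD "second" ""))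
      = (PySem.Str.strip ((ps.foldl pyB_step d).getD "first" ""),
         PySem.Str.strip ((ps.foldl pyB_step d).getD "second" "")) := by
  induction ps with
  | nil => intro d; rfl
  | cons p ps ih =>
    intro d
    rw [List.foldl_cons, List.foldl_cons, pv_step d p, ih (pyB_step d p)]

-- ===== VERDICT (by name: the statement is the Claim_ definition above) =====
theorem parse_interrupt_prompt_py_spec : Claim_equal_parse_interrupt_prompt_py := by
  intro prompt _
  unfold Spec_parse_interrupt_prompt_py
  unfold parse_interrupt_prompt_py parse_interrupt_prompt_py_alt
  set raw := PySem.Str.strip (if prompt = "" then "" else prompt) with hraw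
  by_cases hg : PySem.Str.startswith raw "INTERRUPT_TEST::" = false
  · simp only [hg, if_true]
  · have hg' : PySem.Str.startswith raw "INTERRUPT_TEST::" = true := by
      cases h : PySem.Str.startswith raw "INTERRUPT_TEST::" with
      | false => exact absurd h hg
      | true => rfl
    simp only [hg', Bool.true_eq_false, if_false]
    obtain ⟨T, hT⟩ :=
      (PySem.Chars.startswith_iff _ _).mp (by rw [← PySem.Str.startswith_eq]; exact hg')
    -- hT : "INTERRUPT_TEST::".toList ++ T = raw.toList
    have hLraw : raw.toList = "INTERRUPT_TEST".toList ++ [':', ':'] ++ T := by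
      rw [← hT, show ("INTERRUPT_TEST::".toList : List Char)
        = "INTERRUPT_TEST".toList ++ [':', ':'] from by decide]
    have hmin : ∀ j < ("INTERRUPT_TEST".toList).length,
        ¬ [':', ':'] <+: (("INTERRUPT_TEST".toList ++ [':', ':'] ++ T).drop j) := by
      intro j hj hp
      obtain ⟨t2, ht2⟩ := hp
      have hhead : ("INTERRUPT_TEST".toList ++ [':', ':'] ++ T)[j]? = some ':' := by
        rw [← List.head?_drop, ← ht2]; rfl
      rw [List.append_assoc, List.getElem?_append_left hj] at hhead
      rw [show ("INTERRUPT_TEST".toList : List Char)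
        = ['I','N','T','E','R','R','U','P','T','_','T','E','S','T'] from by decide] at hhead
      rw [show ("INTERRUPT_TEST".toList).length = 14 from by decide] at hj
      interval_cases j <;> exact absurd hhead (by decide)
    have hsM : PySem.Str.splitMax? raw "::" 1
        = some [String.ofList "INTERRUPT_TEST".toList, String.ofList T] := by
      unfold PySem.Str.splitMax? PySem.Chars.splitMax?
      rw [show ("::".toList : List Char) = [':', ':'] from by decide, hLraw,
        if_neg (by decide : ¬ ([':', ':'] : List Char).isEmpty = true),
        pv_splitOnMax_one [':', ':'] "INTERRUPT_TEST".toList T (by decide) hmin]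
      rfl
    have hbody : ((PySem.Str.splitMax? raw "::" 1).getD []).getD 1 ""
        = PySem.Str.slice raw (some 16) none := by
      rw [hsM]
      apply pv_eqStr
      rw [PySem.Str.toList_slice, PySem.Chars.slice_eq_listSlice,
        PySem.List.slice_from _ (by omega), hLraw]
      rw [show ("INTERRUPT_TEST".toList ++ [':', ':'] : List Char)
        = ['I','N','T','E','R','R','U','P','T','_','T','E','S','T',':',':'] from by decide]
      show (String.ofList T).toList = _
      rw [String.toList_ofList]
      rfl
    rw [hbody]
    have hfold := pv_fold ((PySem.Str.split? (PySem.Str.slice raw (some 16) none) ";").getD [])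
      PySem.Dict.empty
    rw [show (PySem.Str.strip ((PySem.Dict.empty : PySem.Dict String String).getD "first" ""),
        PySem.Str.strip ((PySem.Dict.empty : PySem.Dict String String).getD "second" ""))
        = (("", "") : String × String) from by decide] at hfold
    exact hfold
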